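-- pv_equiv track=rewrite | github.com/Naumenko-KM/Yandex_Algorithms | 5E - Красота превыше всего.py | find_shortest_segment_fast
-- ===== SOURCE A (Python) =====
-- def is_segment_full(segment, classes):
--     if set(segment) == classes:
--         return True
--     else:
--         return False
--
-- def find_shortest_segment_fast(N, trees):
--     classes = set(trees)
--     i_best = 1
--     j_best = len(trees)
--     k = 0
--     for i in range(N):
--         for j in range(k, N):
--             k = j
--             segment = trees[i:j+1]
--             if is_segment_full(segment, classes):
--                 if j - i < j_best - i_best:
--                     i_best = i + 1
--                     j_best = j + 1
--                 break
--     return i_best, j_best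
-- ===== SOURCE B (Python) =====
-- def find_shortest_segment_fast(N, trees):
--     # Sliding window: expand a right pointer with a class counter, contract from the left,
--     # instead of re-building set(slice) for every candidate segment.
--     need = len(set(trees))
--     i_best, j_best = 1, len(trees)
--     counts = {}
--     have = 0
--     j = 0
--     M = min(N, len(trees))
--     for i in range(M):
--         while have < need and j < M:
--             x = trees[j]
--             counts[x] = counts.get(x, 0) + 1
--             if counts[x] == 1:
--                 have += 1
--             j += 1
--         if have == need and j - 1 - i < j_best - i_best:
--             i_best, j_best = i + 1, j
--         x = trees[i]
--         counts[x] -= 1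
--         if counts[x] == 0:
--             have -= 1
--     return i_best, j_best
-- ===== Notes on version B (the rewrite author's own statement) =====
-- stated objective: faster
-- what changed: Replaces A's nested rescan that rebuilds set(trees[i:j+1]) from a slice for every candidate segment with a single sliding-window pass keeping an incremental per-class counter and a distinct-count, expanding the right pointer and advancing the left one.
-- intended difference: On an empty trees list with N >= 3, A returns leftover loop state (N, 1) - a segment whose start exceeds its end - while B returns the default (1, 0), the same value A itself returns for an empty list with N <= 2; an empty forest has no segment, so the default is the intended value. — e.g. on find_shortest_segment_fast(3, []): A returns [3, 1], B returns [1, 0]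
import Mathlib
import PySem

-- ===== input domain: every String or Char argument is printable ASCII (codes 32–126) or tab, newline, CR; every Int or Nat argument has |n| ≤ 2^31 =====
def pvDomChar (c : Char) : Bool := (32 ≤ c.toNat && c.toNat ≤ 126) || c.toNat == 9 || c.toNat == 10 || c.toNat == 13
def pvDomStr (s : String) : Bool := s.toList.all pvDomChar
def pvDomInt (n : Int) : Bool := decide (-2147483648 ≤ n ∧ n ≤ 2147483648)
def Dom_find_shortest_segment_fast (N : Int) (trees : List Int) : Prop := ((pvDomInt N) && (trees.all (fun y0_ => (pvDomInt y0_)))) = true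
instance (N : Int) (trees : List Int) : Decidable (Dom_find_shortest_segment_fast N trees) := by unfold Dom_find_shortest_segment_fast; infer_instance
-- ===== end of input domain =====

-- B replaces A's quadratic rescan (set(trees[i:j+1]) rebuilt for every candidate) by a sliding
-- window with an incremental class counter: O(N) dictionary work instead of O(N^2) slice+set work.

-- ===== PORT A =====
def is_segment_full (segment : List Int) (classes : PySem.Set Int) : Bool :=
  if PySem.Set.equal (PySem.Set.ofList segment) classes then true else false

-- inner 'for j in range(k, N): ... break' loop of A (state = (k, i_best, j_best))
def pvAInner (trees : List Int) (classes : PySem.Set Int) (i : Int) :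
    List Int → Int × Int × Int → Int × Int × Int
  | [], st => st
  | j :: js, (_, i_best, j_best) =>
    let k := j
    let segment := PySem.List.slice trees (some i) (some (j + 1))
    if is_segment_full segment classes then
      if j - i < j_best - i_best then (k, i + 1, j + 1) else (k, i_best, j_best)
    else
      pvAInner trees classes i js (k, i_best, j_best)

def pvAStep (trees : List Int) (classes : PySem.Set Int) (N : Int)
    (st : Int × Int × Int) (i : Int) : Int × Int × Int :=
  pvAInner trees classes i (PySem.List.pyRange st.1 N 1) st

def find_shortest_segment_fast (N : Int) (trees : List Int) : List Int :=
  let classes := PySem.Set.ofList trees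
  let st := (PySem.List.pyRange 0 N 1).foldl (pvAStep trees classes N)
      (0, 1, (trees.length : Int))
  [st.2.1, st.2.2]

-- ===== PORT B =====
-- the 'while have < need and j < M' expansion loop of B; fuel (M - j).toNat is a termination
-- artifact only (each pass increases j by 1 and stops at j = M, so the fuel is exact)
def pvBExpand (trees : List Int) (need M : Int) :
    Nat → PySem.Dict Int Int × Int × Int → PySem.Dict Int Int × Int × Int
  | 0, st => st
  | fuel + 1, (counts, hv, j) =>
    if hv < need ∧ j < M then
      let x := PySem.List.pyGetD trees j 0
      let counts := counts.insert x (counts.getD x 0 + 1)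
      let hv := if counts.getD x 0 = 1 then hv + 1 else hv
      pvBExpand trees need M fuel (counts, hv, j + 1)
    else (counts, hv, j)

-- one iteration of B's 'for i in range(M)' loop (state = ((counts, have, j), (i_best, j_best)))
def pvBStep (trees : List Int) (need M : Int)
    (st : (PySem.Dict Int Int × Int × Int) × Int × Int) (i : Int) :
    (PySem.Dict Int Int × Int × Int) × Int × Int :=
  let e := pvBExpand trees need M (M - st.1.2.2).toNat st.1
  let best := if e.2.1 = need ∧ e.2.2 - 1 - i < st.2.2 - st.2.1 then (i + 1, e.2.2) else st.2
  let x := PySem.List.pyGetD trees i 0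
  let counts := e.1.insert x (e.1.getD x 0 - 1)
  let hv := if counts.getD x 0 = 0 then e.2.1 - 1 else e.2.1
  ((counts, hv, e.2.2), best)

def find_shortest_segment_fast_alt (N : Int) (trees : List Int) : List Int :=
  let need : Int := PySem.Set.len (PySem.Set.ofList trees)
  let M : Int := min N (trees.length : Int)
  let st := (PySem.List.pyRange 0 M 1).foldl (pvBStep trees need M)
      ((PySem.Dict.empty, 0, 0), 1, (trees.length : Int))
  [st.2.1, st.2.2]

-- ===== PRECONDITION & SPEC =====
-- On an empty trees list with N ≥ 3, A returns leftover loop state (N, 1) — a "segment" whose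
-- start exceeds its end — while B returns the default (1, 0), the very value A itself returns
-- for an empty list with N ≤ 2; an empty forest has no segment, so the default is the intended value.
def D_find_shortest_segment_fast (N : Int) (trees : List Int) : Prop :=
  trees = [] ∧ 3 ≤ N
instance (N : Int) (trees : List Int) : Decidable (D_find_shortest_segment_fast N trees) := by
  unfold D_find_shortest_segment_fast; infer_instance

def Spec_find_shortest_segment_fast (N : Int) (trees : List Int) (out : List Int) : Prop :=
  ¬ D_find_shortest_segment_fast N trees → out = find_shortest_segment_fast_alt N trees
instance (N : Int) (trees : List Int) (out : List Int) : Decidable (Spec_find_shortest_segment_fast N trees out) := by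
  unfold Spec_find_shortest_segment_fast; infer_instance

def pvDiffWitness_find_shortest_segment_fast : Int × List Int := (3, [])
def pvDiffWitnessOut_find_shortest_segment_fast : (List Int) × (List Int) := ([3, 1], [1, 0])

-- ===== CLAIM (what is proved, stated in full; the proofs are below) =====
def Claim_unchanged_find_shortest_segment_fast : Prop := ∀ (N : Int) (trees : List Int), Dom_find_shortest_segment_fast N trees → Spec_find_shortest_segment_fast N trees (find_shortest_segment_fast N trees)
def Claim_changed_find_shortest_segment_fast : Prop := Dom_find_shortest_segment_fast (pvDiffWitness_find_shortest_segment_fast.1) (pvDiffWitness_find_shortest_segment_fast.2) ∧ D_find_shortest_segment_fast (pvDiffWitness_find_shortest_segment_fast.1) (pvDiffWitness_find_shortest_segment_fast.2) ∧ find_shortest_segment_fast (pvDiffWitness_find_shortest_segment_fast.1) (pvDiffWitness_find_shortest_segment_fast.2) = pvDiffWitnessOut_find_shortest_segment_fast.1 ∧ find_shortest_segment_fast_alt (pvDiffWitness_find_shortest_segment_fast.1) (pvDiffWitness_find_shortest_segment_fast.2) = pvDiffWitnessOut_find_shortest_segment_fast.2 ∧ pvDiffWitnessOut_find_shortest_segment_fast.1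 ≠ pvDiffWitnessOut_find_shortest_segment_fast.2
def Claim_exact_find_shortest_segment_fast : Prop := ∀ (N : Int) (trees : List Int), Dom_find_shortest_segment_fast N trees → D_find_shortest_segment_fast N trees → find_shortest_segment_fast N trees ≠ find_shortest_segment_fast_alt N trees

-- ===== LEMMAS AND PROOFS =====

def pvW (trees : List Int) (a b : Int) : List Int :=
  PySem.List.slice trees (some a) (some b)

theorem pvW_nil (trees : List Int) (a b : Int) (h0 : 0 ≤ a) (hb : 0 ≤ b) (h : b ≤ a) :
    pvW trees a b = [] := by
  unfold pvW
  rw [PySem.List.slice_toNat trees h0 hb]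
  have : b.toNat - a.toNat = 0 := by omega
  simp [this]

theorem pvW_empty_of_len_le (trees : List Int) (a b : Int) (h0 : 0 ≤ a)
    (hb : 0 ≤ b) (h : (trees.length : Int) ≤ a) : pvW trees a b = [] := by
  unfold pvW
  rw [PySem.List.slice_toNat trees h0 hb]
  have : trees.length ≤ a.toNat := by omega
  simp [List.drop_eq_nil_of_le this]

theorem pvW_snoc (trees : List Int) (a b : Int) (h0 : 0 ≤ a) (hab : a ≤ b)
    (hb : b < (trees.length : Int)) :
    pvW trees a (b + 1) = pvW trees a b ++ [PySem.List.pyGetD trees b 0] := by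
  unfold pvW
  rw [PySem.List.slice_toNat trees h0 (by omega), PySem.List.slice_toNat trees h0 (by omega)]
  have h1 : (b+1).toNat - a.toNat = (b.toNat - a.toNat) + 1 := by omega
  rw [h1, List.take_add_one]
  have h2 : b.toNat < trees.length := by omega
  have h3 : (trees.drop a.toNat)[b.toNat - a.toNat]? = some trees[b.toNat] := by
    rw [List.getElem?_drop]
    have : a.toNat + (b.toNat - a.toNat) = b.toNat := by omega
    rw [this, List.getElem?_eq_getElem h2]
  rw [h3]
  have h4 : PySem.List.pyGetD trees b 0 = trees[b.toNat] := by
    rw [PySem.List.pyGetD_of_nonneg trees 0 (by omega : (0:Int) ≤ b), List.getD_eq_getElem?_getD,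
      List.getElem?_eq_getElem h2]
    rfl
  simp [h4]

theorem pvW_cons (trees : List Int) (a b : Int) (h0 : 0 ≤ a) (hab : a < b)
    (ha : a < (trees.length : Int)) :
    pvW trees a b = PySem.List.pyGetD trees a 0 :: pvW trees (a + 1) b := by
  unfold pvW
  rw [PySem.List.slice_toNat trees h0 (by omega), PySem.List.slice_toNat trees (by omega) (by omega)]
  have h2 : a.toNat < trees.length := by omega
  rw [List.drop_eq_getElem_cons h2]
  have h1 : b.toNat - a.toNat = (b.toNat - (a+1).toNat) + 1 := by omega
  rw [h1, List.take_succ_cons]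
  have h4 : PySem.List.pyGetD trees a 0 = trees[a.toNat] := by
    rw [PySem.List.pyGetD_of_nonneg trees 0 h0, List.getD_eq_getElem?_getD,
      List.getElem?_eq_getElem h2]
    rfl
  have h5 : (a+1).toNat = a.toNat + 1 := by omega
  rw [h4, h5]

theorem pvW_clip (trees : List Int) (a b : Int) (h0 : 0 ≤ a)
    (hb : (trees.length : Int) ≤ b) : pvW trees a b = pvW trees a (trees.length : Int) := by
  unfold pvW
  rw [PySem.List.slice_toNat trees h0 (by omega), PySem.List.slice_toNat trees h0 (by omega)]
  have h1 : trees.length - a.toNat ≤ b.toNat - a.toNat := by omega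
  rw [List.take_of_length_le (by simp only [List.length_drop]; omega),
    List.take_of_length_le (by simp only [List.length_drop]; omega)]

theorem pvW_subset (trees : List Int) (a b : Int) : pvW trees a b ⊆ trees := by
  intro x hx
  exact PySem.List.mem_of_mem_slice _ _ _ hx

theorem len_ofList_congr (l l' : List Int) (h : ∀ x : Int, x ∈ l ↔ x ∈ l') :
    (PySem.Set.ofList l).length = (PySem.Set.ofList l').length := by
  have hp : (PySem.Set.ofList l).Perm (PySem.Set.ofList l') := by
    rw [List.perm_ext_iff_of_nodup (PySem.Set.nodup_ofList l) (PySem.Set.nodup_ofList l')]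
    intro x
    rw [PySem.Set.mem_ofList, PySem.Set.mem_ofList]
    exact h x
  exact hp.length_eq

theorem len_ofList_snoc (l : List Int) (x : Int) :
    ((PySem.Set.ofList (l ++ [x])).length : Int)
      = (PySem.Set.ofList l).length + (if x ∈ l then 0 else 1) := by
  rw [PySem.Set.ofList_append_singleton, PySem.Set.add_eq_ite]
  by_cases hx : x ∈ l
  · simp [hx, PySem.Set.mem_ofList]
  · simp [hx, PySem.Set.mem_ofList]

theorem len_ofList_cons (l : List Int) (x : Int) :
    ((PySem.Set.ofList (x :: l)).length : Int)
      = (PySem.Set.ofList l).length + (if x ∈ l then 0 else 1) := by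
  have h := len_ofList_congr (x :: l) (l ++ [x]) (by intro y; simp [or_comm])
  rw [h, len_ofList_snoc]

def pvD (trees : List Int) (a b : Int) : Int :=
  ((PySem.Set.ofList (pvW trees a b)).length : Int)

theorem ofList_subperm (l trees : List Int) (h : l ⊆ trees) :
    (PySem.Set.ofList l).Subperm (PySem.Set.ofList trees) := by
  apply List.Nodup.subperm (PySem.Set.nodup_ofList l)
  intro x hx
  rw [PySem.Set.mem_ofList] at hx ⊢
  exact h hx

theorem pvD_le_need (trees : List Int) (a b : Int) :
    pvD trees a b ≤ ((PySem.Set.ofList trees).length : Int) := by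
  have := (ofList_subperm (pvW trees a b) trees (pvW_subset trees a b)).length_le
  unfold pvD
  omega

theorem pvD_empty (trees : List Int) (a b : Int) (h0 : 0 ≤ a) (hb : 0 ≤ b) (h : b ≤ a) :
    pvD trees a b = 0 := by
  unfold pvD
  rw [pvW_nil trees a b h0 hb h]
  rfl

theorem pvD_empty_of_len_le (trees : List Int) (a b : Int) (h0 : 0 ≤ a) (hb : 0 ≤ b)
    (h : (trees.length : Int) ≤ a) : pvD trees a b = 0 := by
  unfold pvD
  rw [pvW_empty_of_len_le trees a b h0 hb h]
  rfl

theorem pvD_snoc (trees : List Int) (a b : Int) (h0 : 0 ≤ a) (hab : a ≤ b)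
    (hb : b < (trees.length : Int)) :
    pvD trees a (b + 1)
      = pvD trees a b + (if PySem.List.pyGetD trees b 0 ∈ pvW trees a b then 0 else 1) := by
  unfold pvD
  rw [pvW_snoc trees a b h0 hab hb, len_ofList_snoc]

theorem pvD_cons (trees : List Int) (a b : Int) (h0 : 0 ≤ a) (hab : a < b)
    (ha : a < (trees.length : Int)) :
    pvD trees a b
      = pvD trees (a + 1) b + (if PySem.List.pyGetD trees a 0 ∈ pvW trees (a + 1) b then 0 else 1) := by
  unfold pvD
  rw [pvW_cons trees a b h0 hab ha, len_ofList_cons]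

theorem pvD_pos_lt (trees : List Int) (a b : Int) (h0 : 0 ≤ a) (hb : 0 ≤ b)
    (h : 1 ≤ pvD trees a b) : a < b := by
  by_contra hc
  rw [pvD_empty trees a b h0 hb (by omega)] at h
  omega

theorem full_iff (trees : List Int) (a b : Int) :
    is_segment_full (pvW trees a b) (PySem.Set.ofList trees)
      = decide (pvD trees a b = ((PySem.Set.ofList trees).length : Int)) := by
  unfold is_segment_full
  have hsub := ofList_subperm (pvW trees a b) trees (pvW_subset trees a b)
  by_cases h : pvD trees a b = ((PySem.Set.ofList trees).length : Int)
  · have hperm : (PySem.Set.ofList (pvW trees a b)).Perm (PySem.Set.ofList trees) :=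
      hsub.perm_of_length_le (by unfold pvD at h; omega)
    have heq : PySem.Set.equal (PySem.Set.ofList (pvW trees a b)) (PySem.Set.ofList trees) = true :=
      (PySem.Set.equal_iff _ _).2 (fun x => hperm.mem_iff)
    simp [heq, h]
  · have heq : PySem.Set.equal (PySem.Set.ofList (pvW trees a b)) (PySem.Set.ofList trees) = false := by
      by_contra hc
      have ht : PySem.Set.equal (PySem.Set.ofList (pvW trees a b)) (PySem.Set.ofList trees) = true := by
        revert hc; cases PySem.Set.equal (PySem.Set.ofList (pvW trees a b)) (PySem.Set.ofList trees) <;> simp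
      have hmem := (PySem.Set.equal_iff _ _).1 ht
      have hperm : (PySem.Set.ofList (pvW trees a b)).Perm (PySem.Set.ofList trees) := by
        rw [List.perm_ext_iff_of_nodup (PySem.Set.nodup_ofList _) (PySem.Set.nodup_ofList _)]
        exact hmem
      exact h (by unfold pvD; rw [hperm.length_eq])
    simp [heq, h]

def pvScanF (trees : List Int) (need M a : Int) : Nat → Int → Int
  | 0, j => j
  | fuel + 1, j =>
    if pvD trees a j = need then j
    else if j < M then pvScanF trees need M a fuel (j + 1) else j

def pvScanM (trees : List Int) (need M a j : Int) : Int :=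
  pvScanF trees need M a (M - j).toNat j

theorem pvScanM_unfold (trees : List Int) (need M a j : Int) :
    pvScanM trees need M a j
      = if pvD trees a j = need then j
        else if j < M then pvScanM trees need M a (j + 1) else j := by
  unfold pvScanM
  by_cases hj : j < M
  · have h1 : (M - j).toNat = (M - (j + 1)).toNat + 1 := by omega
    rw [h1]
    rfl
  · have h1 : (M - j).toNat = 0 := by omega
    rw [h1]
    simp only [pvScanF, if_neg hj]
    split <;> rfl

theorem pvScanM_spec (trees : List Int) (need M a : Int) :
    ∀ j : Int, j ≤ M →
      j ≤ pvScanM trees need M a j ∧ pvScanM trees need M a j ≤ M ∧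
        (pvD trees a (pvScanM trees need M a j) = need ∨ pvScanM trees need M a j = M) := by
  intro j hj
  have hn : ∃ n : Nat, (M - j).toNat = n := ⟨_, rfl⟩
  obtain ⟨n, hn⟩ := hn
  induction n generalizing j with
  | zero =>
    have hjM : j = M := by omega
    rw [pvScanM_unfold]
    subst hjM
    split <;> simp
  | succ n ih =>
    rw [pvScanM_unfold]
    by_cases hd : pvD trees a j = need
    · simp [hd, hj]
    · rw [if_neg hd]
      by_cases hlt : j < M
      · rw [if_pos hlt]
        have := ih (j + 1) (by omega) (by omega)
        refine ⟨by omega, this.2.1, this.2.2⟩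
      · simp [hlt]; omega

theorem pvScanM_congr (trees : List Int) (need M a : Int) :
    ∀ (m j : Int), j ≤ m → m ≤ M →
      (∀ j' : Int, j ≤ j' → j' < m → pvD trees a j' ≠ need) →
      pvScanM trees need M a j = pvScanM trees need M a m := by
  intro m j hjm
  have hn : ∃ n : Nat, (m - j).toNat = n := ⟨_, rfl⟩
  obtain ⟨n, hn⟩ := hn
  induction n generalizing j with
  | zero =>
    have : j = m := by omega
    intro _ _; rw [this]
  | succ n ih =>
    intro hmM hpre
    have hjm' : j < m := by omega
    rw [pvScanM_unfold, if_neg (hpre j le_rfl hjm'), if_pos (by omega)]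
    exact ih (j + 1) (by omega) (by omega) hmM (fun j' h1 h2 => hpre j' (by omega) h2)

def pvCNT (counts : PySem.Dict Int Int) (trees : List Int) (a b : Int) : Prop :=
  ∀ x : Int, counts.getD x 0 = ((pvW trees a b).count x : Int)

theorem pvBExpand_spec (trees : List Int) (need M a : Int)
    (hneed : need = ((PySem.Set.ofList trees).length : Int))
    (hML : M ≤ (trees.length : Int)) (h0 : 0 ≤ a) :
    ∀ (fuel : Nat) (j : Int) (counts : PySem.Dict Int Int), a ≤ j → j ≤ M →
      (M - j).toNat ≤ fuel → pvCNT counts trees a j →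
      (pvBExpand trees need M fuel (counts, pvD trees a j, j)).2.1
          = pvD trees a (pvScanM trees need M a j) ∧
      (pvBExpand trees need M fuel (counts, pvD trees a j, j)).2.2 = pvScanM trees need M a j ∧
      pvCNT (pvBExpand trees need M fuel (counts, pvD trees a j, j)).1 trees a
        (pvScanM trees need M a j) := by
  intro fuel
  induction fuel with
  | zero =>
    intro j counts haj hjM hfuel hcnt
    have hjM' : j = M := by omega
    have hr : pvScanM trees need M a j = j := by
      rw [pvScanM_unfold]
      split
      · rfl
      · rw [if_neg (by omega)]
    rw [hr]
    exact ⟨rfl, rfl, hcnt⟩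
  | succ fuel ih =>
    intro j counts haj hjM hfuel hcnt
    by_cases hd : pvD trees a j = need
    · have hcond : ¬ (pvD trees a j < need ∧ j < M) := by omega
      have hr : pvScanM trees need M a j = j := by rw [pvScanM_unfold, if_pos hd]
      rw [hr]
      simp only [pvBExpand, if_neg hcond]
      refine ⟨?_, ?_, ?_⟩ <;> trivial
    · by_cases hjlt : j < M
      · have hdle : pvD trees a j ≤ need := hneed ▸ pvD_le_need trees a j
        have hcond : pvD trees a j < need ∧ j < M := ⟨by omega, hjlt⟩
        have hr : pvScanM trees need M a j = pvScanM trees need M a (j + 1) := by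
          rw [pvScanM_unfold, if_neg hd, if_pos hjlt]
        set x := PySem.List.pyGetD trees j 0 with hx
        have hjL : j < (trees.length : Int) := by omega
        have hwsnoc := pvW_snoc trees a j h0 haj hjL
        have hcx : counts.getD x 0 = ((pvW trees a j).count x : Int) := hcnt x
        -- the updated counter is the counter of the extended window
        have hcnt' : pvCNT (counts.insert x (counts.getD x 0 + 1)) trees a (j + 1) := by
          intro y
          rw [PySem.Dict.getD_insert, hwsnoc]
          by_cases hyx : y = x
          · subst hyx
            rw [if_pos rfl, hcx, List.count_append, ← hx]
            have h1 : List.count x [x] = 1 := by simp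
            push_cast
            omega
          · rw [if_neg hyx, hcnt y, List.count_append, ← hx]
            have h1 : List.count y [x] = 0 := by
              simp [List.count_cons]
              exact fun h => hyx h.symm
            push_cast
            omega
        -- the updated have is the distinct count of the extended window
        have hget : (counts.insert x (counts.getD x 0 + 1)).getD x 0
            = ((pvW trees a j).count x : Int) + 1 := by
          rw [PySem.Dict.getD_insert, if_pos rfl, hcx]
        have hhv : (if (counts.insert x (counts.getD x 0 + 1)).getD x 0 = 1
              then pvD trees a j + 1 else pvD trees a j) = pvD trees a (j + 1) := by
          rw [pvD_snoc trees a j h0 haj hjL, hget]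
          by_cases hmem : x ∈ pvW trees a j
          · have h2 : 0 < List.count x (pvW trees a j) := List.count_pos_iff.2 hmem
            rw [if_neg (by omega), if_pos hmem]
            omega
          · have : (pvW trees a j).count x = 0 := List.count_eq_zero.2 hmem
            rw [if_pos (by omega), if_neg hmem]
          
        have hstep : pvBExpand trees need M (fuel + 1) (counts, pvD trees a j, j)
            = pvBExpand trees need M fuel
                (counts.insert x (counts.getD x 0 + 1), pvD trees a (j + 1), j + 1) := by
          simp only [pvBExpand, if_pos hcond]
          rw [← hx, hhv]
        rw [hstep, hr]
        exact ih (j + 1) _ (by omega) (by omega) (by omega) hcnt'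
      · have hcond : ¬ (pvD trees a j < need ∧ j < M) := by omega
        have hr : pvScanM trees need M a j = j := by
          rw [pvScanM_unfold, if_neg hd, if_neg hjlt]
        rw [hr]
        simp only [pvBExpand, if_neg hcond]
        refine ⟨?_, ?_, ?_⟩ <;> trivial

theorem pvAInner_fail (trees : List Int) (classes : PySem.Set Int) (i : Int)
    (hclasses : classes = PySem.Set.ofList trees) :
    ∀ (N k c ib jb : Int),
      (∀ j' : Int, k ≤ j' → j' < N → pvD trees i (j' + 1) ≠ ((PySem.Set.ofList trees).length : Int)) →
      pvAInner trees classes i (PySem.List.pyRange k N 1) (c, ib, jb)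
        = (if k < N then N - 1 else c, ib, jb) := by
  intro N k
  have hn : ∃ n : Nat, (N - k).toNat = n := ⟨_, rfl⟩
  obtain ⟨n, hn⟩ := hn
  induction n generalizing k with
  | zero =>
    intro c ib jb _
    have hk : N ≤ k := by omega
    rw [PySem.List.pyRange_one_eq_nil hk]
    rw [if_neg (by omega)]
    rfl
  | succ n ih =>
    intro c ib jb hfail
    have hk : k < N := by omega
    rw [PySem.List.pyRange_one_cons hk]
    show pvAInner trees classes i (k :: PySem.List.pyRange (k + 1) N 1) (c, ib, jb) = _
    simp only [pvAInner]
    have hfull : is_segment_full (PySem.List.slice trees (some i) (some (k + 1))) classes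
        = false := by
      rw [hclasses]
      have := full_iff trees i (k + 1)
      unfold pvW at this
      rw [this]
      simp [hfail k le_rfl hk]
    rw [hfull]
    simp only [Bool.false_eq_true, if_false]
    rw [ih (k + 1) (by omega) k ib jb (fun j' h1 h2 => hfail j' (by omega) h2)]
    by_cases h2 : k + 1 < N
    · rw [if_pos h2, if_pos hk]
    · rw [if_neg h2, if_pos hk]
      have : k = N - 1 := by omega
      rw [this]

theorem pvAInner_spec (trees : List Int) (classes : PySem.Set Int) (N M i : Int)
    (hclasses : classes = PySem.Set.ofList trees)
    (hM : M = min N (trees.length : Int)) (h0 : 0 ≤ i)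
    (need : Int) (hneed : need = ((PySem.Set.ofList trees).length : Int)) :
    ∀ (k ib jb : Int), k + 1 ≤ M →
      pvAInner trees classes i (PySem.List.pyRange k N 1) (k, ib, jb)
        = (let r := pvScanM trees need M i (k + 1);
           if pvD trees i r = need then
             (r - 1, if r - 1 - i < jb - ib then (i + 1, r) else (ib, jb))
           else (N - 1, ib, jb)) := by
  intro k
  have hn : ∃ n : Nat, (N - k).toNat = n := ⟨_, rfl⟩
  obtain ⟨n, hn⟩ := hn
  induction n generalizing k with
  | zero =>
    intro ib jb hkM
    omega  -- k + 1 ≤ M ≤ N contradicts N ≤ k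
  | succ n ih =>
    intro ib jb hkM
    have hk : k < N := by omega
    rw [PySem.List.pyRange_one_cons hk]
    show pvAInner trees classes i (k :: PySem.List.pyRange (k + 1) N 1) (k, ib, jb) = _
    simp only [pvAInner]
    have hfull : is_segment_full (PySem.List.slice trees (some i) (some (k + 1))) classes
        = decide (pvD trees i (k + 1) = need) := by
      rw [hclasses, hneed]
      have := full_iff trees i (k + 1)
      unfold pvW at this
      rw [this]
    rw [hfull]
    by_cases hd : pvD trees i (k + 1) = need
    · rw [if_pos (by simp [hd])]
      have hr : pvScanM trees need M i (k + 1) = k + 1 := by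
        rw [pvScanM_unfold, if_pos hd]
      simp only [hr, if_pos hd]
      have e1 : k + 1 - 1 = k := by omega
      rw [e1]
      split_ifs <;> rfl
    · rw [if_neg (by simp [hd])]
      by_cases hk2 : k + 1 + 1 ≤ M
      · -- the scan continues: recurse
        have := ih (k + 1) (by omega) ib jb hk2
        have hre : pvAInner trees classes i (PySem.List.pyRange (k + 1) N 1) (k, ib, jb)
            = pvAInner trees classes i (PySem.List.pyRange (k + 1) N 1) (k + 1, ib, jb) := by
          rw [PySem.List.pyRange_one_cons (show k + 1 < N by omega)]
          rfl
        rw [hre, this]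
        have hr : pvScanM trees need M i (k + 1) = pvScanM trees need M i (k + 1 + 1) := by
          rw [pvScanM_unfold, if_neg hd, if_pos (by omega)]
        rw [hr]
      · -- k + 1 = M : the window never fills; all later checks are the clipped window
        have hkM' : k + 1 = M := by omega
        have hr : pvScanM trees need M i (k + 1) = k + 1 := by
          rw [pvScanM_unfold, if_neg hd, if_neg (by omega)]
        rw [hr, if_neg hd]
        have hfail : ∀ j' : Int, k + 1 ≤ j' → j' < N →
            pvD trees i (j' + 1) ≠ ((PySem.Set.ofList trees).length : Int) := by
          intro j' h1 h2
          -- here M < N forces M = trees.length, and the window clips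
          have hMN : M < N := by omega
          have hML : M = (trees.length : Int) := by omega
          have hclip : pvD trees i (j' + 1) = pvD trees i M := by
            unfold pvD
            rw [pvW_clip trees i (j' + 1) h0 (by omega), ← hML]
          rw [hclip, ← hkM', ← hneed]
          exact hd
        rw [pvAInner_fail trees classes i hclasses N (k + 1) k ib jb hfail]
        by_cases h2 : k + 1 < N
        · rw [if_pos h2]
        · rw [if_neg h2]
          have : k = N - 1 := by omega
          rw [this]

theorem need_pos (trees : List Int) (hne : trees ≠ []) :
    1 ≤ ((PySem.Set.ofList trees).length : Int) := by
  rcases trees with _ | ⟨t, ts⟩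
  · exact absurd rfl hne
  · have : t ∈ PySem.Set.ofList (t :: ts) := (PySem.Set.mem_ofList _ _).2 (by simp)
    have := List.length_pos_of_mem this
    omega

theorem pvA_tail (trees : List Int) (classes : PySem.Set Int) (N : Int)
    (hclasses : classes = PySem.Set.ofList trees) (hne : trees ≠ []) :
    ∀ (a k ib jb : Int), (trees.length : Int) ≤ a → 0 ≤ k →
      ((PySem.List.pyRange a N 1).foldl (pvAStep trees classes N) (k, ib, jb)).2 = (ib, jb) := by
  intro a
  have hn : ∃ n : Nat, (N - a).toNat = n := ⟨_, rfl⟩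
  obtain ⟨n, hn⟩ := hn
  induction n generalizing a with
  | zero =>
    intro k ib jb hLa hk0
    rw [PySem.List.pyRange_one_eq_nil (by omega)]
    rfl
  | succ n ih =>
    intro k ib jb hLa hk0
    have ha : a < N := by omega
    rw [PySem.List.pyRange_one_cons ha, List.foldl_cons]
    have hstep : pvAStep trees classes N (k, ib, jb) a
        = (if k < N then N - 1 else k, ib, jb) := by
      unfold pvAStep
      apply pvAInner_fail trees classes a hclasses
      intro j' h1 h2
      rw [pvD_empty_of_len_le trees a (j' + 1) (by omega) (by omega) hLa]
      have := need_pos trees hne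
      omega
    rw [hstep]
    by_cases hkN : k < N
    · rw [if_pos hkN]
      exact ih (a + 1) (by omega) (N - 1) ib jb (by omega) (by omega)
    · rw [if_neg hkN]
      exact ih (a + 1) (by omega) k ib jb (by omega) (by omega)

theorem pvRemove (trees : List Int) (i b : Int) (h0 : 0 ≤ i) (hib : i < b) (hiL : i < (trees.length : Int))
    (e1 : PySem.Dict Int Int) (hcnt : pvCNT e1 trees i b) :
    (∀ y : Int, (e1.insert (PySem.List.pyGetD trees i 0)
        (e1.getD (PySem.List.pyGetD trees i 0) 0 - 1)).getD y 0
          = ((pvW trees (i + 1) b).count y : Int)) ∧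
    ((if (e1.insert (PySem.List.pyGetD trees i 0)
        (e1.getD (PySem.List.pyGetD trees i 0) 0 - 1)).getD (PySem.List.pyGetD trees i 0) 0 = 0
      then pvD trees i b - 1 else pvD trees i b) = pvD trees (i + 1) b) := by
  set x := PySem.List.pyGetD trees i 0 with hx
  have hwc := pvW_cons trees i b h0 hib hiL
  have hcx : e1.getD x 0 = ((pvW trees i b).count x : Int) := hcnt x
  have hcountx : (pvW trees i b).count x = (pvW trees (i + 1) b).count x + 1 := by
    rw [hwc, ← hx, List.count_cons]
    simp
  have hcnt2 : ∀ y : Int, (e1.insert x (e1.getD x 0 - 1)).getD y 0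
      = ((pvW trees (i + 1) b).count y : Int) := by
    intro y
    rw [PySem.Dict.getD_insert]
    by_cases hyx : y = x
    · subst hyx
      rw [if_pos rfl, hcx, hcountx]
      push_cast
      omega
    · rw [if_neg hyx, hcnt y, hwc, ← hx, List.count_cons]
      have : (x == y) = false := by
        simp
        exact fun h => hyx h.symm
      rw [this]
      simp
  refine ⟨hcnt2, ?_⟩
  rw [hcnt2 x]
  have hd := pvD_cons trees i b h0 hib hiL
  by_cases hmem : x ∈ pvW trees (i + 1) b
  · have h2 : 0 < List.count x (pvW trees (i + 1) b) := List.count_pos_iff.2 hmem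
    rw [if_neg (by omega)]
    rw [← hx] at hd
    rw [hd, if_pos hmem]
    omega
  · have h2 : List.count x (pvW trees (i + 1) b) = 0 := List.count_eq_zero.2 hmem
    rw [if_pos (by omega)]
    rw [← hx] at hd
    rw [hd, if_neg hmem]
    omega

theorem pvOuter (trees : List Int) (classes : PySem.Set Int) (N M need : Int)
    (hclasses : classes = PySem.Set.ofList trees)
    (hneed : need = ((PySem.Set.ofList trees).length : Int))
    (hM : M = min N (trees.length : Int)) (hne : trees ≠ []) (hM1 : 1 ≤ M) :
    ∀ (i : Int), 0 ≤ i → i ≤ M →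
      ∀ (k j0 ib jb hv0 : Int) (counts : PySem.Dict Int Int),
      pvCNT counts trees i j0 → hv0 = pvD trees i j0 → 0 ≤ j0 → j0 ≤ M → i ≤ j0 →
      ((j0 ≤ k + 1 ∧ k + 1 ≤ M ∧
          (∀ j' : Int, j0 ≤ j' → j' < k + 1 → pvD trees i j' ≠ need)) ∨
        (k = N - 1 ∧ j0 = M ∧ pvD trees i M ≠ need)) →
      ((PySem.List.pyRange i N 1).foldl (pvAStep trees classes N) (k, ib, jb)).2
        = ((PySem.List.pyRange i M 1).foldl (pvBStep trees need M)
            ((counts, hv0, j0), ib, jb)).2 := by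
  have hML : M ≤ (trees.length : Int) := by omega
  have hMN : M ≤ N := by omega
  have hneed1 : 1 ≤ need := hneed ▸ need_pos trees hne
  intro i
  have hn : ∃ n : Nat, (M - i).toNat = n := ⟨_, rfl⟩
  obtain ⟨n, hn⟩ := hn
  induction n generalizing i with
  | zero =>
    intro h0 hiM k j0 ib jb hv0 counts hcnt hhv hj00 hj0M hij0 hinv
    have hk0 : 0 ≤ k := by
      rcases hinv with ⟨h1, h2, _⟩ | ⟨h1, _, _⟩ <;> omega
    rw [PySem.List.pyRange_one_eq_nil (show M ≤ i by omega), List.foldl_nil]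
    by_cases hNM : N ≤ i
    · rw [PySem.List.pyRange_one_eq_nil hNM, List.foldl_nil]
    · rw [pvA_tail trees classes N hclasses hne i k ib jb (by omega) hk0]
  | succ n ih =>
    intro h0 hiM k j0 ib jb hv0 counts hcnt hhv hj00 hj0M hij0 hinv
    have hiM' : i < M := by omega
    have hiL : i < (trees.length : Int) := by omega
    rw [PySem.List.pyRange_one_cons (show i < N by omega),
        PySem.List.pyRange_one_cons hiM', List.foldl_cons, List.foldl_cons]
    -- B expansion
    have hexp := pvBExpand_spec trees need M i hneed hML h0 (M - j0).toNat j0 counts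
      hij0 hj0M le_rfl hcnt
    set e := pvBExpand trees need M (M - j0).toNat (counts, pvD trees i j0, j0) with he
    obtain ⟨he1, he2, hecnt⟩ := hexp
    set r := pvScanM trees need M i j0 with hr
    obtain ⟨hj0r, hrM, hend⟩ := pvScanM_spec trees need M i j0 hj0M
    have hBstep : pvBStep trees need M ((counts, hv0, j0), ib, jb) i
        = ((e.1.insert (PySem.List.pyGetD trees i 0)
              (e.1.getD (PySem.List.pyGetD trees i 0) 0 - 1),
            (if (e.1.insert (PySem.List.pyGetD trees i 0)
                  (e.1.getD (PySem.List.pyGetD trees i 0) 0 - 1)).getD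
                  (PySem.List.pyGetD trees i 0) 0 = 0
             then pvD trees i r - 1 else pvD trees i r), r),
           (if pvD trees i r = need ∧ r - 1 - i < jb - ib then (i + 1, r) else (ib, jb))) := by
      simp only [pvBStep, hhv, ← he, he1, he2]
    rcases hinv with ⟨hjk, hkM, hpre⟩ | ⟨hkN, hj0M', hdM⟩
    · -- ACTIVE
      have hscaneq : r = pvScanM trees need M i (k + 1) :=
        pvScanM_congr trees need M i (k + 1) j0 hjk (by omega) hpre
      have hAstep : pvAStep trees classes N (k, ib, jb) i
          = (if pvD trees i r = need then
               (r - 1, if r - 1 - i < jb - ib then (i + 1, r) else (ib, jb))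
             else (N - 1, ib, jb)) := by
        have hA := pvAInner_spec trees classes N M i hclasses hM h0 need hneed k ib jb hkM
        rw [← hscaneq] at hA
        exact hA
      by_cases hdr : pvD trees i r = need
      · -- the window fills at r
        have hir : i < r := by
          apply pvD_pos_lt trees i r h0 (by omega)
          omega
        obtain ⟨hcnt2, hhv2⟩ := pvRemove trees i r h0 hir hiL e.1 hecnt
        rw [hAstep, hBstep, if_pos hdr, hhv2, hdr]
        simp only [true_and]
        by_cases hcnd : r - 1 - i < jb - ib
        · rw [if_pos hcnd]
          exact ih (i + 1) (by omega) (by omega) (by omega) (r - 1) r (i + 1) r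
            (pvD trees (i + 1) r) _ hcnt2 rfl (by omega) (by omega) (by omega)
            (Or.inl ⟨by omega, by omega, fun j' h1 h2 => absurd h2 (by omega)⟩)
        · rw [if_neg hcnd]
          exact ih (i + 1) (by omega) (by omega) (by omega) (r - 1) r ib jb
            (pvD trees (i + 1) r) _ hcnt2 rfl (by omega) (by omega) (by omega)
            (Or.inl ⟨by omega, by omega, fun j' h1 h2 => absurd h2 (by omega)⟩)
      · -- no full window from i on: r = M, the best pair never changes again
        have hrM' : r = M := by tauto
        rw [hrM'] at hBstep hdr hecnt
        obtain ⟨hcnt2, hhv2⟩ := pvRemove trees i M h0 hiM' hiL e.1 hecnt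
        have hdM2 : pvD trees (i + 1) M ≠ need := by
          have hd := pvD_cons trees i M h0 hiM' hiL
          have hle := pvD_le_need trees i M
          have hle2 : pvD trees (i + 1) M ≤ pvD trees i M := by
            rw [hd]
            split <;> omega
          have := hneed ▸ hle
          omega
        rw [hAstep, hrM', if_neg hdr, hBstep, hhv2,
          if_neg (by rintro ⟨hc, _⟩; exact hdr hc)]
        exact ih (i + 1) (by omega) (by omega) (by omega) (N - 1) M ib jb
          (pvD trees (i + 1) M) _ hcnt2 rfl (by omega) le_rfl (by omega)
          (Or.inr ⟨rfl, rfl, hdM2⟩)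
    · -- FAILED: neither side changes the best pair any more
      have hj0r : r = M := by
        rw [hr, hj0M']
        rw [pvScanM_unfold, if_neg (hj0M' ▸ hdM), if_neg (by omega)]
      rw [hj0r] at hBstep hecnt
      obtain ⟨hcnt2, hhv2⟩ := pvRemove trees i M h0 hiM' hiL e.1 hecnt
      have hdM2 : pvD trees (i + 1) M ≠ need := by
        have hd := pvD_cons trees i M h0 hiM' hiL
        have hle := pvD_le_need trees i M
        have hle2 : pvD trees (i + 1) M ≤ pvD trees i M := by
          rw [hd]
          split <;> omega
        have := hneed ▸ hle
        omega
      have hAres : pvAStep trees classes N (k, ib, jb) i = (N - 1, ib, jb) := by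
        unfold pvAStep
        have hfail : ∀ j' : Int, k ≤ j' → j' < N →
            pvD trees i (j' + 1) ≠ ((PySem.Set.ofList trees).length : Int) := by
          intro j' h1 h2
          have hj' : j' = N - 1 := by omega
          subst hj'
          have heq : pvD trees i (N - 1 + 1) = pvD trees i M := by
            by_cases hNL : N ≤ (trees.length : Int)
            · have hMNeq : M = N := by omega
              rw [hMNeq]
              norm_num
            · have hML' : M = (trees.length : Int) := by omega
              unfold pvD
              rw [pvW_clip trees i (N - 1 + 1) h0 (by omega), ← hML']
          rw [heq, ← hneed]
          exact hdM
        have hres := pvAInner_fail trees classes i hclasses N k k ib jb hfail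
        rw [hres, if_pos (by omega)]
      rw [hAres, hBstep, hhv2, if_neg (by rintro ⟨hc, _⟩; exact hdM hc)]
      exact ih (i + 1) (by omega) (by omega) (by omega) (N - 1) M ib jb
        (pvD trees (i + 1) M) _ hcnt2 rfl (by omega) le_rfl (by omega)
        (Or.inr ⟨rfl, rfl, hdM2⟩)

theorem pv_slice_nil (a b : Option Int) : PySem.List.slice ([] : List Int) a b = [] := by
  cases h : PySem.List.slice ([] : List Int) a b with
  | nil => rfl
  | cons x l =>
    have hx : x ∈ ([] : List Int) :=
      PySem.List.mem_of_mem_slice _ _ _ (h ▸ List.mem_cons_self)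
    simp at hx

theorem pvA_emptystep (N i ib jb : Int) (hN : 0 < N) :
    pvAStep ([] : List Int) (PySem.Set.ofList ([] : List Int)) N (0, ib, jb) i
      = (0, if 0 - i < jb - ib then (i + 1, 0 + 1) else (ib, jb)) := by
  unfold pvAStep
  rw [show ((0:Int), ib, jb).1 = 0 from rfl, PySem.List.pyRange_one_cons hN]
  simp only [pvAInner]
  rw [pv_slice_nil]
  have hfull : is_segment_full ([] : List Int) (PySem.Set.ofList ([] : List Int)) = true := by
    decide
  rw [hfull]
  simp only [if_true]
  split_ifs <;> rfl

theorem pvA_emptyfold (N : Int) :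
    ∀ (a : Int), 3 ≤ a → a ≤ N →
      ((PySem.List.pyRange a N 1).foldl
          (pvAStep ([] : List Int) (PySem.Set.ofList ([] : List Int)) N) (0, a, 1)) = (0, N, 1) := by
  intro a
  have hn : ∃ n : Nat, (N - a).toNat = n := ⟨_, rfl⟩
  obtain ⟨n, hn⟩ := hn
  induction n generalizing a with
  | zero =>
    intro h3 haN
    have : a = N := by omega
    rw [PySem.List.pyRange_one_eq_nil (by omega), List.foldl_nil, this]
  | succ n ih =>
    intro h3 haN
    have haN' : a < N := by omega
    rw [PySem.List.pyRange_one_cons haN', List.foldl_cons,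
      pvA_emptystep N a a 1 (by omega), if_pos (by omega)]
    have e1 : (0 : Int) + 1 = 1 := by norm_num
    rw [e1]
    exact ih (a + 1) (by omega) (by omega) (by omega)

theorem pv_len_eq (s : PySem.Set Int) : PySem.Set.len s = (s.length : Int) := rfl

theorem pvA_empty (N : Int) (h : 3 ≤ N) :
    find_shortest_segment_fast N [] = [N, 1] := by
  show [((PySem.List.pyRange 0 N 1).foldl (pvAStep [] (PySem.Set.ofList ([] : List Int)) N)
      (0, 1, (([] : List Int).length : Int))).2.1, _] = _
  simp only [List.length_nil, Nat.cast_zero]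
  rw [PySem.List.pyRange_one_cons (show (0:Int) < N by omega), List.foldl_cons,
    pvA_emptystep N 0 1 0 (by omega), if_neg (by omega)]
  rw [PySem.List.pyRange_one_cons (show (0:Int) + 1 < N by omega), List.foldl_cons,
    pvA_emptystep N (0 + 1) 1 0 (by omega), if_neg (by omega)]
  rw [PySem.List.pyRange_one_cons (show (0:Int) + 1 + 1 < N by omega), List.foldl_cons,
    pvA_emptystep N (0 + 1 + 1) 1 0 (by omega), if_pos (by omega)]
  have e1 : (0:Int) + 1 + 1 + 1 = 3 := by norm_num
  have e2 : (0:Int) + 1 = 1 := by norm_num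
  rw [e1, e2]
  rw [pvA_emptyfold N 3 le_rfl (by omega)]

theorem main_equiv (N : Int) (trees : List Int)
    (h : ¬ (trees = [] ∧ 3 ≤ N)) :
    find_shortest_segment_fast N trees = find_shortest_segment_fast_alt N trees := by
  show [((PySem.List.pyRange 0 N 1).foldl (pvAStep trees (PySem.Set.ofList trees) N)
      (0, 1, (trees.length : Int))).2.1, _]
    = [((PySem.List.pyRange 0 (min N (trees.length : Int)) 1).foldl
        (pvBStep trees (PySem.Set.len (PySem.Set.ofList trees)) (min N (trees.length : Int)))
        ((PySem.Dict.empty, 0, 0), 1, (trees.length : Int))).2.1, _]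
  by_cases hne : trees = []
  · subst hne
    have hN : N ≤ 2 := by
      by_contra hc
      exact h ⟨rfl, by omega⟩
    rcases (by omega : N ≤ 0 ∨ N = 1 ∨ N = 2) with h0 | h1 | h2
    · rw [PySem.List.pyRange_one_eq_nil (by omega : N ≤ 0),
        PySem.List.pyRange_one_eq_nil (by simp : min N ((([]:List Int).length :Int)) ≤ 0)]
      rfl
    · subst h1; decide
    · subst h2; decide
  · by_cases hN : N ≤ 0
    · rw [PySem.List.pyRange_one_eq_nil (by omega : N ≤ 0),
        PySem.List.pyRange_one_eq_nil (show min N ((trees.length : Int)) ≤ 0 by omega)]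
      rfl
    · have hM1 : 1 ≤ min N (trees.length : Int) := by
        have : trees.length ≠ 0 := fun hc => hne (List.eq_nil_of_length_eq_zero hc)
        omega
      have hfold := pvOuter trees (PySem.Set.ofList trees) N (min N (trees.length : Int))
        (PySem.Set.len (PySem.Set.ofList trees)) rfl (pv_len_eq _) rfl hne hM1
        0 le_rfl (by omega) 0 0 1 (trees.length : Int) 0 PySem.Dict.empty
        (by
          intro x
          rw [PySem.Dict.getD_empty, pvW_nil trees 0 0 le_rfl le_rfl le_rfl]
          rfl)
        (by rw [pvD_empty trees 0 0 le_rfl le_rfl le_rfl])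
        le_rfl (by omega) le_rfl
        (Or.inl ⟨by omega, by omega, by
          intro j' h1 h2
          have hj0 : j' = 0 := by omega
          subst hj0
          have := need_pos trees hne
          rw [pvD_empty trees 0 0 le_rfl le_rfl le_rfl, pv_len_eq]
          omega⟩)
      have h1 := congrArg Prod.fst hfold
      have h2 := congrArg (fun p : Int × Int => p.2) hfold
      simp only at h1 h2
      rw [h1, h2]

-- ===== VERDICT =====
theorem find_shortest_segment_fast_spec : Claim_unchanged_find_shortest_segment_fast := by
  intro N trees _ hD
  exact main_equiv N trees (fun hc => hD hc)

theorem find_shortest_segment_fast_changed : Claim_changed_find_shortest_segment_fast := by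
  unfold Claim_changed_find_shortest_segment_fast; decide

theorem find_shortest_segment_fast_tight : Claim_exact_find_shortest_segment_fast := by
  intro N trees _ hD
  obtain ⟨h1, h2⟩ := hD
  subst h1
  rw [pvA_empty N h2]
  have hB : find_shortest_segment_fast_alt N [] = [1, 0] := by
    show [((PySem.List.pyRange 0 (min N ((([] : List Int).length : Int))) 1).foldl
        (pvBStep [] (PySem.Set.len (PySem.Set.ofList ([] : List Int)))
          (min N ((([] : List Int).length : Int))))
        ((PySem.Dict.empty, 0, 0), 1, ((([] : List Int).length : Int)))).2.1, _] = _
    rw [PySem.List.pyRange_one_eq_nil (by simp : min N ((([] : List Int).length : Int)) ≤ 0)]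
    rfl
  rw [hB]
  intro heq
  simp at heq
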